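-- pv_equiv track=rewrite | github.com/srivatsaaaa/gamesphere | backend/specs_db.py | tier_from_string
-- ===== SOURCE A (Python) =====
-- def tier_from_string(text: str, table: dict, default: int = 3) -> int:
--     """Return the best-matching tier for a free-form CPU/GPU string."""
--     if not text:
--         return default
--     t = text.lower().strip()
--     # longest key first so 'rtx 3080 ti' beats 'rtx 3080'
--     for key in sorted(table.keys(), key=len, reverse=True):
--         if key in t:
--             return table[key]
--     return default
-- ===== SOURCE B (Python) =====
-- def tier_from_string(text: str, table: dict, default: int = 3) -> int:
--     """Return the best-matching tier for a free-form CPU/GPU string."""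
--     if not text:
--         return default
--     t = text.lower().strip()
--     best = None  # (key, value) of the longest matching key seen so far
--     for key, val in table.items():
--         if (best is None or len(key) > len(best[0])) and key in t:
--             best = (key, val)
--     return best[1] if best is not None else default
-- ===== Notes on version B (the rewrite author's own statement) =====
-- stated objective: simpler
-- what changed: Dropped the sort entirely: one pass over the dict in native order keeps the longest matching key seen so far (strict > preserves A's stable-sort tie-break), instead of sorting all keys by length and scanning for the first match.
import Mathlib
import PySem

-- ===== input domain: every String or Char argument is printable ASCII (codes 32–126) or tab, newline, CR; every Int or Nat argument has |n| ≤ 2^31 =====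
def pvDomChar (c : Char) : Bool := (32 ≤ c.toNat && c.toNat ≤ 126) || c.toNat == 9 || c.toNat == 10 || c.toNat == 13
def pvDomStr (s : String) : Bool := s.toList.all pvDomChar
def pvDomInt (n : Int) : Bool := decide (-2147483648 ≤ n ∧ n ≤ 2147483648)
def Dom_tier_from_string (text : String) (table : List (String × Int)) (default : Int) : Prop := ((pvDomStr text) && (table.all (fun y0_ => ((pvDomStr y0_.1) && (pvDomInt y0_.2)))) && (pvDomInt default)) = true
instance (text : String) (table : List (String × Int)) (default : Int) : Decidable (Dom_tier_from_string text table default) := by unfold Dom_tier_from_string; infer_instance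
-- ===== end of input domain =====

-- B replaces A's sort-then-scan by a single pass over the dict keeping the longest matching key (simpler; same results).

-- ===== PORT A =====
-- the 'for key in …: if key in t: return table[key]' loop
def tierLoopA (t : String) (d : PySem.Dict String Int) (default : Int) : List String → Int
  | [] => default
  | k :: ks => if PySem.Str.isIn k t then d.getD k default else tierLoopA t d default ks

def tier_from_string (text : String) (table : List (String × Int)) (default : Int) : Int :=
  if PySem.Str.len text = 0 then default
  else
    let t := PySem.Str.strip (PySem.Str.lower text)
    let d := PySem.Dict.ofList table
    tierLoopA t d default (PySem.List.sorted d.keys (fun k => PySem.Str.len k) true)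

-- ===== PORT B =====
def tier_from_string_alt (text : String) (table : List (String × Int)) (default : Int) : Int :=
  if PySem.Str.len text = 0 then default
  else
    let t := PySem.Str.strip (PySem.Str.lower text)
    let d := PySem.Dict.ofList table
    match d.items.foldl
      (fun best kv =>
        if (match best with
             | none => true
             | some b => decide (PySem.Str.len b.1 < PySem.Str.len kv.1)) &&
            PySem.Str.isIn kv.1 t then some kv else best)
      (none : Option (String × Int)) with
    | some b => b.2
    | none => default

-- ===== PRECONDITION & SPEC =====
def Spec_tier_from_string (text : String) (table : List (String × Int)) (default : Int) (out : Int) : Prop := out = tier_from_string_alt text table default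
instance (text : String) (table : List (String × Int)) (default : Int) (out : Int) : Decidable (Spec_tier_from_string text table default out) := by unfold Spec_tier_from_string; infer_instance

-- ===== CLAIM (what is proved, stated in full; the proofs are below) =====
def Claim_equal_tier_from_string : Prop := ∀ (text : String) (table : List (String × Int)) (default : Int), Dom_tier_from_string text table default → Spec_tier_from_string text table default (tier_from_string text table default)

-- ===== LEMMAS AND PROOFS =====

-- the running-best update B's loop performs, abstracted over the key/test
def bestUpd {α : Type} (key : α → Int) (p : α → Bool) (best : Option α) (x : α) : Option α :=
  if (match best with | none => true | some b => decide (key b < key x)) && p x then some x else best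

theorem pairwise_insertBy {α : Type} (key : α → Int) (x : α) (acc : List α)
    (h : acc.Pairwise (fun a b => key b ≤ key a)) :
    (PySem.List.insertBy (fun a b => decide (key b < key a)) x acc).Pairwise (fun a b => key b ≤ key a) := by
  induction acc with
  | nil => simp [PySem.List.insertBy]
  | cons y ys ih =>
    rcases List.pairwise_cons.mp h with ⟨hy, hys⟩
    by_cases hxy : key y < key x
    · simp only [PySem.List.insertBy, hxy, decide_true, if_pos]
      refine List.pairwise_cons.mpr ⟨?_, h⟩
      intro b hb
      rcases List.mem_cons.mp hb with rfl | hb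
      · omega
      · have := hy b hb; omega
    · simp only [PySem.List.insertBy, hxy, decide_false, Bool.false_eq_true, if_false]
      refine List.pairwise_cons.mpr ⟨?_, ih hys⟩
      intro b hb
      rcases (PySem.List.mem_insertBy _ _ _ _).mp hb with rfl | hb
      · omega
      · exact hy b hb

theorem find?_insertBy {α : Type} (key : α → Int) (p : α → Bool) (x : α) (acc : List α)
    (h : acc.Pairwise (fun a b => key b ≤ key a)) :
    (PySem.List.insertBy (fun a b => decide (key b < key a)) x acc).find? p
      = bestUpd key p (acc.find? p) x := by
  induction acc with
  | nil =>
    simp only [PySem.List.insertBy, List.find?_nil, bestUpd]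
    cases hp : p x <;> simp [List.find?, hp]
  | cons y ys ih =>
    rcases List.pairwise_cons.mp h with ⟨hy, hys⟩
    by_cases hxy : key y < key x
    · simp only [PySem.List.insertBy, hxy, decide_true, if_pos]
      cases hp : p x with
      | true =>
        rw [List.find?_cons_of_pos hp]
        cases hf : (y :: ys).find? p with
        | none => simp [bestUpd, hp]
        | some b =>
          have hb : b ∈ y :: ys := List.mem_of_find?_eq_some hf
          have hble : key b ≤ key y := by
            rcases List.mem_cons.mp hb with rfl | hb
            · omega
            · exact hy b hb
          simp only [bestUpd, hp]
          rw [if_pos (by simp; omega)]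
      | false =>
        rw [List.find?_cons_of_neg (by simp [hp])]
        cases hf : (y :: ys).find? p <;> simp [bestUpd, hp]
    · simp only [PySem.List.insertBy, hxy, decide_false, Bool.false_eq_true, if_false]
      cases hpy : p y with
      | true =>
        rw [List.find?_cons_of_pos hpy, List.find?_cons_of_pos hpy]
        simp only [bestUpd]
        cases hp : p x <;> simp [hxy]
      | false =>
        rw [List.find?_cons_of_neg (by simp [hpy]), List.find?_cons_of_neg (by simp [hpy])]
        exact ih hys

theorem find?_foldl_insertBy {α : Type} (key : α → Int) (p : α → Bool) :
    ∀ (xs acc : List α), acc.Pairwise (fun a b => key b ≤ key a) →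
    (xs.foldl (fun acc x => PySem.List.insertBy (fun a b => decide (key b < key a)) x acc) acc).find? p
      = xs.foldl (bestUpd key p) (acc.find? p) := by
  intro xs
  induction xs with
  | nil => intro acc _; rfl
  | cons x xs ih =>
    intro acc h
    simp only [List.foldl_cons]
    rw [ih _ (pairwise_insertBy key x acc h), find?_insertBy key p x acc h]

theorem find?_sorted_rev {α : Type} (key : α → Int) (p : α → Bool) (xs : List α) :
    (PySem.List.sorted xs key true).find? p = xs.foldl (bestUpd key p) none := by
  rw [PySem.List.sorted_rev_eq_foldl_insertBy]
  simpa using find?_foldl_insertBy key p xs [] (List.Pairwise.nil)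

theorem foldl_bestUpd_map {α β : Type} (f : α → β) (key : β → Int) (p : β → Bool) :
    ∀ (l : List α) (acc : Option α),
    (l.map f).foldl (bestUpd key p) (acc.map f)
      = (l.foldl (bestUpd (fun a => key (f a)) (fun a => p (f a))) acc).map f := by
  intro l
  induction l with
  | nil => intro acc; rfl
  | cons x xs ih =>
    intro acc
    simp only [List.map_cons, List.foldl_cons]
    rw [← ih]
    congr 1
    unfold bestUpd
    cases acc with
    | none => simp
    | some a =>
      simp only [Option.map_some]
      by_cases hc : (decide (key (f a) < key (f x)) && p (f x)) = true <;> simp [hc]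

theorem bestUpd_eq_some {α : Type} (key : α → Int) (p : α → Bool) (acc : Option α) (x b : α)
    (h : bestUpd key p acc x = some b) : b = x ∨ acc = some b := by
  cases acc with
  | none =>
    simp only [bestUpd] at h
    split at h
    · exact Or.inl (by cases h; rfl)
    · cases h
  | some a =>
    simp only [bestUpd] at h
    split at h
    · exact Or.inl (by cases h; rfl)
    · exact Or.inr h

theorem foldl_bestUpd_mem {α : Type} (key : α → Int) (p : α → Bool) :
    ∀ (l : List α) (acc : Option α) (b : α), l.foldl (bestUpd key p) acc = some b →
      b ∈ l ∨ acc = some b := by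
  intro l
  induction l with
  | nil => intro acc b h; exact Or.inr h
  | cons x xs ih =>
    intro acc b h
    simp only [List.foldl_cons] at h
    rcases ih _ b h with hb | hb
    · exact Or.inl (List.mem_cons_of_mem _ hb)
    · rcases bestUpd_eq_some key p acc x b hb with rfl | hb
      · exact Or.inl (List.mem_cons_self ..)
      · exact Or.inr hb

theorem foldl_bestUpd_map_none {α β : Type} (f : α → β) (key : β → Int) (p : β → Bool) (l : List α) :
    (l.map f).foldl (bestUpd key p) none
      = (l.foldl (bestUpd (fun a => key (f a)) (fun a => p (f a))) none).map f :=
  foldl_bestUpd_map f key p l none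

theorem tierLoopA_eq_find? (t : String) (d : PySem.Dict String Int) (default : Int) (l : List String) :
    tierLoopA t d default l
      = match l.find? (fun k => PySem.Str.isIn k t) with
        | some k => d.getD k default
        | none => default := by
  induction l with
  | nil => rfl
  | cons k ks ih =>
    rw [tierLoopA]
    cases hk : PySem.Str.isIn k t with
    | true => rw [if_pos rfl, List.find?_cons_of_pos (by simpa using hk)]
    | false =>
      rw [if_neg (by simp), List.find?_cons_of_neg (by simpa using hk), ih]

-- ===== VERDICT (by name: the statement is the Claim_ definition above) =====
theorem tier_from_string_spec : Claim_equal_tier_from_string := by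
  intro text table default _
  unfold Spec_tier_from_string tier_from_string tier_from_string_alt
  by_cases h0 : PySem.Str.len text = 0
  · rw [if_pos h0, if_pos h0]
  · rw [if_neg h0, if_neg h0]
    dsimp only
    set t := PySem.Str.strip (PySem.Str.lower text) with ht
    set d := PySem.Dict.ofList table with hd
    rw [tierLoopA_eq_find?]
    rw [find?_sorted_rev (fun k => PySem.Str.len k) (fun k => PySem.Str.isIn k t) d.keys]
    have hkeys : d.keys = d.items.map Prod.fst := rfl
    rw [hkeys, foldl_bestUpd_map_none (Prod.fst) (fun k => PySem.Str.len k) (fun k => PySem.Str.isIn k t) d.items]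
    have hbody : (fun (best : Option (String × Int)) (kv : String × Int) =>
        if (match best with
             | none => true
             | some b => decide (PySem.Str.len b.1 < PySem.Str.len kv.1)) &&
            PySem.Str.isIn kv.1 t then some kv else best)
        = bestUpd (fun a : String × Int => PySem.Str.len a.1) (fun a : String × Int => PySem.Str.isIn a.1 t) := by
      funext best kv; cases best <;> rfl
    rw [hbody]
    cases hres : d.items.foldl (bestUpd (fun a : String × Int => PySem.Str.len a.1) (fun a : String × Int => PySem.Str.isIn a.1 t)) none with
    | none => simp
    | some b =>
      simp only [Option.map_some]
      rcases foldl_bestUpd_mem _ _ d.items none b hres with hb | hb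
      · have hnodup : d.keys.Nodup := PySem.Dict.nodup_keys_ofList table
        have hgd : d.getD b.1 default = b.2 :=
          PySem.Dict.getD_of_mem_items d (by simpa using hb) hnodup default
        simp [hgd]
      · simp at hb
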